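-- pv_equiv track=rewrite | github.com/1343804976gzla-crypto/true-learning-system | migrate_confidence_contracts.py | summarize_values
-- ===== SOURCE A (Python) =====
-- from typing import Any, Dict, List, Tuple
--
-- def summarize_values(values: List[Any]) -> Dict[str, int]:
--     counts: Dict[str, int] = {}
--     for value in values:
--         if value is None:
--             label = "<null>"
--         else:
--             text = str(value).strip()
--             label = text if text else "<empty>"
--         counts[label] = counts.get(label, 0) + 1
--     return dict(sorted(counts.items(), key=lambda item: item[0]))
-- ===== SOURCE B (Python) =====
-- from typing import Any, Dict, List
--
--
-- def summarize_values(values: List[Any]) -> Dict[str, int]: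
--     def _label(value: Any) -> str:
--         if value is None:
--             return "<null>"
--         text = str(value).strip()
--         return text if text else "<empty>"
--
--     labels = sorted(_label(value) for value in values)
--     result: Dict[str, int] = {}
--     n = len(labels)
--     i = 0
--     while i < n:
--         j = i + 1
--         while j < n and labels[j] == labels[i]:
--             j += 1
--         result[labels[i]] = j - i
--         i = j
--     return result
-- ===== Notes on version B (the rewrite author's own statement) =====
-- stated objective: alternative
-- what changed: B sorts the full list of normalized labels first and then counts adjacent equal runs in one scan over the sorted list (a manual groupby), with no hash-map counting and no final key sort; A counts into a dict as it goes and sorts the dict items at the end.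
import Mathlib
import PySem

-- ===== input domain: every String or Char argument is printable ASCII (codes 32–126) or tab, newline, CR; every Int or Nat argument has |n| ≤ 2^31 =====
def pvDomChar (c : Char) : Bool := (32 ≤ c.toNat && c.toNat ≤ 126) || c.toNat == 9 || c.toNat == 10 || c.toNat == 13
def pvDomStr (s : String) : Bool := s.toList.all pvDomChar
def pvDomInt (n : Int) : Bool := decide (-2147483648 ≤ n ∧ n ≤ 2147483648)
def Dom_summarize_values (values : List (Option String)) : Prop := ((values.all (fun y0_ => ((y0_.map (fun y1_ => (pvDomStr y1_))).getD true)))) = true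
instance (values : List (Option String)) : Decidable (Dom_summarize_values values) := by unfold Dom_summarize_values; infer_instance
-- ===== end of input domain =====

-- B sorts the full list of normalized labels and counts adjacent equal runs in one scan
-- (a manual groupby), instead of A's count-as-you-go dict followed by a sort of its items.

-- ===== PORT A =====
def summarize_values (values : List (Option String)) : List (String × Int) :=
  let counts := values.foldl (fun d value =>
    let label := match value with
      | none => "<null>"
      | some v =>
        let text := PySem.Str.strip v
        if text = "" then "<empty>" else text
    d.insert label (d.getD label 0 + 1)) (PySem.Dict.empty)
  PySem.List.sorted counts.items (fun item => item.1) false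

-- ===== PORT B =====
def pvLabel (value : Option String) : String :=
  match value with
  | none => "<null>"
  | some v =>
    let text := PySem.Str.strip v
    if text = "" then "<empty>" else text

-- the outer while loop of B: peel the run of labels equal to the head, record its length, recurse on the rest
def pvRuns : List String → List (String × Int)
  | [] => []
  | x :: xs =>
    (x, ((xs.takeWhile (fun y => y == x)).length : Int) + 1) :: pvRuns (xs.dropWhile (fun y => y == x))
termination_by L => L.length
decreasing_by
  simpa using Nat.lt_succ_of_le (List.length_dropWhile_le _ _)

def summarize_values_alt (values : List (Option String)) : List (String × Int) :=
  pvRuns (PySem.List.sorted (values.map pvLabel) (fun x => x) false)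

-- ===== PRECONDITION & SPEC =====
def Spec_summarize_values (values : List (Option String)) (out : List (String × Int)) : Prop := out = summarize_values_alt values
instance (values : List (Option String)) (out : List (String × Int)) : Decidable (Spec_summarize_values values out) := by unfold Spec_summarize_values; infer_instance

-- ===== CLAIM =====
def Claim_equal_summarize_values : Prop := ∀ (values : List (Option String)), Dom_summarize_values values → Spec_summarize_values values (summarize_values values)

-- ===== LEMMAS AND PROOFS =====

-- A's fold body, with the inline label computation named: it is pvLabel.
lemma summarize_values_eq_sorted_counter (values : List (Option String)) :
    summarize_values values =
      PySem.List.sorted (PySem.Dict.counter (values.map pvLabel)).items (fun item => item.1) false := by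
  have h :
      values.foldl (fun d value =>
        let label := match value with
          | none => "<null>"
          | some v =>
            let text := PySem.Str.strip v
            if text = "" then "<empty>" else text
        d.insert label (d.getD label 0 + 1)) (PySem.Dict.empty)
        = PySem.Dict.counter (values.map pvLabel) := by
    rw [← PySem.Dict.foldl_insert_getD_add_one_eq_counter, List.foldl_map]
    apply PySem.List.foldl_congr_mem
    intro acc x _
    cases x <;> rfl
  exact congrArg (fun d => PySem.List.sorted d.items (fun item => item.1) false) h

-- properties of pvRuns on a ≤-sorted list: run keys are strictly increasing,
-- each recorded count is the count in the whole list, and the keys are exactly the members.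
lemma pvRuns_props : ∀ (L : List String), L.Pairwise (· ≤ ·) →
    ((pvRuns L).Pairwise (fun a b => a.1 < b.1)) ∧
    (∀ p ∈ pvRuns L, p.2 = (L.count p.1 : Int)) ∧
    (∀ k, (∃ p ∈ pvRuns L, p.1 = k) ↔ k ∈ L) := by
  intro L
  induction L using pvRuns.induct with
  | case1 => simp [pvRuns]
  | case2 x xs ih =>
    intro hp
    have hsplit : xs = xs.takeWhile (fun y => y == x) ++ xs.dropWhile (fun y => y == x) :=
      (List.takeWhile_append_dropWhile).symm
    have hrun : ∀ y ∈ xs.takeWhile (fun y => y == x), y = x := by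
      intro y hy
      have := List.mem_takeWhile_imp hy
      simpa using this
    have hxle : ∀ y ∈ xs, x ≤ y := by
      intro y hy; exact (List.pairwise_cons.mp hp).1 y hy
    have hrest_sub : List.Sublist (xs.dropWhile (fun y => y == x)) xs := List.dropWhile_sublist _
    have hrest_pair : (xs.dropWhile (fun y => y == x)).Pairwise (· ≤ ·) :=
      ((List.pairwise_cons.mp hp).2).sublist hrest_sub
    -- every element of the rest is strictly above x
    have hlt : ∀ z ∈ xs.dropWhile (fun y => y == x), x < z := by
      intro z hz
      rcases hr : xs.dropWhile (fun y => y == x) with _ | ⟨y, t⟩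
      · rw [hr] at hz; simp at hz
      · rw [hr] at hz
        have h0 : xs.dropWhile (fun y => y == x) ≠ [] := by simp [hr]
        have hyne : (y == x) = false := by
          simpa [hr] using List.head_dropWhile_not (fun y => y == x) h0
        have hyx : y ≠ x := by simpa using hyne
        have hym : y ∈ xs := hrest_sub.mem (by simp [hr])
        have hxy : x < y := lt_of_le_of_ne (hxle y hym) (Ne.symm hyx)
        rcases List.mem_cons.mp hz with rfl | hzt
        · exact hxy
        · have : y ≤ z := by
            rw [hr] at hrest_pair
            exact (List.pairwise_cons.mp hrest_pair).1 z hzt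
          exact lt_of_lt_of_le hxy this
    obtain ⟨ih1, ih2, ih3⟩ := ih hrest_pair
    have hxnotin : x ∉ xs.dropWhile (fun y => y == x) := fun h => lt_irrefl x (hlt x h)
    refine ⟨?_, ?_, ?_⟩
    · rw [pvRuns]
      refine List.pairwise_cons.mpr ⟨?_, ih1⟩
      intro p hpmem
      have : p.1 ∈ xs.dropWhile (fun y => y == x) := (ih3 p.1).mp ⟨p, hpmem, rfl⟩
      exact hlt p.1 this
    · rw [pvRuns]
      intro p hp'
      rcases List.mem_cons.mp hp' with rfl | hmem
      · -- head run: count of x in x :: xs is 1 + run length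
        simp only
        rw [List.count_cons_self]
        conv_rhs => rw [hsplit]
        rw [List.count_append]
        have h1 : (xs.takeWhile (fun y => y == x)).count x = (xs.takeWhile (fun y => y == x)).length := by
          apply List.count_eq_length.mpr
          intro y hy; exact ((hrun y hy) ▸ rfl)
        have h2 : (xs.dropWhile (fun y => y == x)).count x = 0 :=
          List.count_eq_zero.mpr hxnotin
        rw [h1, h2]
        push_cast; ring
      · have hk : p.1 ∈ xs.dropWhile (fun y => y == x) := (ih3 p.1).mp ⟨p, hmem, rfl⟩
        have hkx : p.1 ≠ x := fun h => hxnotin (h ▸ hk)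
        have := ih2 p hmem
        rw [this]
        congr 1
        -- count p.1 over x :: xs equals count over the rest
        conv_rhs => rw [hsplit]
        rw [List.count_cons, List.count_append]
        have htw : (xs.takeWhile (fun y => y == x)).count p.1 = 0 := by
          apply List.count_eq_zero.mpr
          intro h; exact hkx (hrun _ h)
        simp [htw, Ne.symm hkx]
    · intro k
      rw [pvRuns]
      constructor
      · rintro ⟨p, hp', rfl⟩
        rcases List.mem_cons.mp hp' with rfl | hmem
        · exact List.mem_cons_self
        · have := (ih3 p.1).mp ⟨p, hmem, rfl⟩
          exact List.mem_cons_of_mem x (hrest_sub.mem this)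
      · intro hk
        rcases List.mem_cons.mp hk with rfl | hmem
        · exact ⟨_, List.mem_cons_self, rfl⟩
        · rw [hsplit] at hmem
          rcases List.mem_append.mp hmem with h | h
          · exact ⟨_, List.mem_cons_self, (hrun _ h).symm⟩
          · obtain ⟨p, hpm, hpk⟩ := (ih3 k).mpr h
            exact ⟨p, List.mem_cons_of_mem _ hpm, hpk⟩

theorem summarize_values_spec : Claim_equal_summarize_values := by
  intro values _
  unfold Spec_summarize_values summarize_values_alt
  rw [summarize_values_eq_sorted_counter, PySem.Dict.items_counter]
  set labels := values.map pvLabel with hl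
  set S := PySem.List.sorted labels (fun x => x) false with hS
  have hSpair : S.Pairwise (· ≤ ·) := by
    have := PySem.List.sorted_pairwise (xs := labels) (key := fun x => x) -- key id
    simpa [hS] using this
  have hSperm : S.Perm labels := PySem.List.sorted_perm _ _ _
  obtain ⟨h1, h2, h3⟩ := pvRuns_props S hSpair
  apply PySem.List.sorted_eq_of_perm_of_pairwise_lt
  · -- pvRuns S is a permutation of (set(labels)).map (k ↦ (k, labels.count k))
    have hfix : pvRuns S = ((pvRuns S).map Prod.fst).map (fun k => (k, (labels.count k : Int))) := by
      rw [List.map_map]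
      apply List.ext_getElem (by simp)
      intro i hi hi'
      simp only [List.getElem_map, Function.comp]
      have hp := h2 ((pvRuns S)[i]) (List.getElem_mem _)
      have hc : S.count ((pvRuns S)[i]).1 = labels.count ((pvRuns S)[i]).1 := hSperm.count_eq _
      rw [hc] at hp
      exact Prod.ext rfl hp
    rw [hfix]
    apply List.Perm.map
    -- keys of pvRuns S ~ set(labels): both nodup with the same members
    have hklt : ((pvRuns S).map Prod.fst).Pairwise (· < ·) :=
      List.Pairwise.map Prod.fst (fun {a b} h => h) h1
    have hknd : ((pvRuns S).map Prod.fst).Nodup := hklt.imp ne_of_lt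
    have hsnd : (PySem.Set.ofList labels).Nodup := PySem.Set.nodup_ofList _
    rw [List.perm_ext_iff_of_nodup hknd hsnd]
    intro a
    rw [PySem.Set.mem_ofList]
    constructor
    · intro ha
      obtain ⟨p, hpm, hpk⟩ := List.mem_map.mp ha
      exact hSperm.mem_iff.mp ((h3 a).mp ⟨p, hpm, hpk⟩)
    · intro ha
      obtain ⟨p, hpm, hpk⟩ := (h3 a).mpr (hSperm.mem_iff.mpr ha)
      exact List.mem_map.mpr ⟨p, hpm, hpk⟩
  · exact h1
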